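-- pv_equiv track=rewrite | github.com/dragutin-oreski/advent_of_code | 2022/15_day/solution.py | _walk_around
-- ===== SOURCE A (Python) =====
-- def _walk_around(x_original, y_original, dist, limit):
--
--     x = x_original + dist + 1
--     y = y_original
--
--     while x > x_original:
--         if 0 <= x <= limit and 0 <= y <= limit:
--             yield x, y
--         x -= 1
--         y -= 1
--     while y_original > y:
--         if 0 <= x <= limit and 0 <= y <= limit:
--             yield x, y
--         x -= 1
--         y += 1
--     while x_original > x:
--         if 0 <= x <= limit and 0 <= y <= limit:
--             yield x, y
--         x += 1
--         y += 1
--     while y > y_original: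
--         if 0 <= x <= limit and 0 <= y <= limit:
--             yield x, y
--         x += 1
--         y -= 1
-- ===== SOURCE B (Python) =====
-- def _walk_around(x_original, y_original, dist, limit):
--     # Clip each diamond edge analytically: compute the closed-form parameter
--     # interval [lo, hi] of in-grid t's and generate only those points (no
--     # per-point bounds test).
--     n = dist + 1
--     edges = [
--         (x_original + n, y_original, -1, -1),
--         (x_original, y_original - n, -1, 1),
--         (x_original - n, y_original, 1, 1),
--         (x_original, y_original + n, 1, -1),
--     ]
--     for sx, sy, dx, dy in edges:
--         lo_x, hi_x = (-sx, limit - sx) if dx == 1 else (sx - limit, sx)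
--         lo_y, hi_y = (-sy, limit - sy) if dy == 1 else (sy - limit, sy)
--         lo = max(0, lo_x, lo_y)
--         hi = min(n - 1, hi_x, hi_y)
--         for t in range(lo, hi + 1):
--             yield (sx + dx * t, sy + dy * t)
-- ===== Notes on version B (the rewrite author's own statement) =====
-- stated objective: alternative
-- what changed: B clips each diamond edge analytically -- it computes the closed-form parameter interval of in-grid t's per edge via max/min arithmetic and generates only those points -- instead of A's four stateful while-loops that walk every boundary point and test each against the grid.
-- intended difference: For dist < -1 whose leftover half-walk hits the grid square (A's last two while-loops still run because x starts left of x_original), A yields stray points of a degenerate diamond, e.g. [(0,2),(1,1)] at (0,0,-3,10); B's clipped intervals are empty and it yields nothing, the intended result for a negative radius. — e.g. on _walk_around(0, 0, -3, 10): A returns [(0, 2), (1, 1)], B returns []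
import Mathlib
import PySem

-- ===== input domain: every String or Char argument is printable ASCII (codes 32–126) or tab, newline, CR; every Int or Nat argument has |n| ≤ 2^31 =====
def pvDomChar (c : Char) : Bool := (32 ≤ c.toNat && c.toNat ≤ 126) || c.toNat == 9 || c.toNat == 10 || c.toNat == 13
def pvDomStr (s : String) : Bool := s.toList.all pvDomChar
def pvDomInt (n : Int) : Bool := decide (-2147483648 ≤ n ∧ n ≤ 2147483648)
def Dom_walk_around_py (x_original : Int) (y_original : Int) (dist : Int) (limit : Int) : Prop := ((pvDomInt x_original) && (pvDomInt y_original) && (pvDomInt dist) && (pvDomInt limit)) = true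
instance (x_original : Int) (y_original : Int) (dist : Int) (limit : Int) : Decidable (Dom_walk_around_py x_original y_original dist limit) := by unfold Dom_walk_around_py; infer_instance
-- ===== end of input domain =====

-- B clips each diamond edge analytically: it computes the closed-form parameter interval of
-- in-grid points per edge and generates only those, instead of A's four stateful while-loops
-- that test every point (objective: alternative; per-point bounds test removed).
-- A is a generator; both ports return the list of yielded points.  In port A each while loop is a
-- tail-recursive function; acc collects the yielded points newest-first and is reversed at the end.

-- ===== PORT A =====
-- fourth while loop: while y > y_original
def pvLoop4 (x_original y_original limit : Int) (x y : Int) (acc : List (Int × Int)) : List (Int × Int) :=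
  if y > y_original then
    pvLoop4 x_original y_original limit (x + 1) (y - 1)
      (if 0 ≤ x ∧ x ≤ limit ∧ 0 ≤ y ∧ y ≤ limit then (x, y) :: acc else acc)
  else acc
termination_by (y - y_original).toNat
decreasing_by omega

-- third while loop: while x_original > x
def pvLoop3 (x_original y_original limit : Int) (x y : Int) (acc : List (Int × Int)) : List (Int × Int) :=
  if x_original > x then
    pvLoop3 x_original y_original limit (x + 1) (y + 1)
      (if 0 ≤ x ∧ x ≤ limit ∧ 0 ≤ y ∧ y ≤ limit then (x, y) :: acc else acc)
  else pvLoop4 x_original y_original limit x y acc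
termination_by (x_original - x).toNat
decreasing_by omega

-- second while loop: while y_original > y
def pvLoop2 (x_original y_original limit : Int) (x y : Int) (acc : List (Int × Int)) : List (Int × Int) :=
  if y_original > y then
    pvLoop2 x_original y_original limit (x - 1) (y + 1)
      (if 0 ≤ x ∧ x ≤ limit ∧ 0 ≤ y ∧ y ≤ limit then (x, y) :: acc else acc)
  else pvLoop3 x_original y_original limit x y acc
termination_by (y_original - y).toNat
decreasing_by omega

-- first while loop: while x > x_original
def pvLoop1 (x_original y_original limit : Int) (x y : Int) (acc : List (Int × Int)) : List (Int × Int) :=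
  if x > x_original then
    pvLoop1 x_original y_original limit (x - 1) (y - 1)
      (if 0 ≤ x ∧ x ≤ limit ∧ 0 ≤ y ∧ y ≤ limit then (x, y) :: acc else acc)
  else pvLoop2 x_original y_original limit x y acc
termination_by (x - x_original).toNat
decreasing_by omega

def walk_around_py (x_original : Int) (y_original : Int) (dist : Int) (limit : Int) : List (Int × Int) :=
  (pvLoop1 x_original y_original limit (x_original + dist + 1) y_original []).reverse

-- ===== PORT B =====
-- one edge of Source B's for-loop body: clip the parameter interval, then generate the points
def pvEdge (limit n : Int) (e : Int × Int × Int × Int) : List (Int × Int) :=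
  let sx := e.1; let sy := e.2.1; let dx := e.2.2.1; let dy := e.2.2.2
  let lo_x := if dx == 1 then -sx else sx - limit
  let hi_x := if dx == 1 then limit - sx else sx
  let lo_y := if dy == 1 then -sy else sy - limit
  let hi_y := if dy == 1 then limit - sy else sy
  let lo := max (max 0 lo_x) lo_y
  let hi := min (min (n - 1) hi_x) hi_y
  (PySem.List.pyRange lo (hi + 1) 1).map (fun t => (sx + dx * t, sy + dy * t))

def walk_around_py_alt (x_original : Int) (y_original : Int) (dist : Int) (limit : Int) : List (Int × Int) :=
  let n := dist + 1
  let edges : List (Int × Int × Int × Int) :=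
    [(x_original + n, y_original, -1, -1), (x_original, y_original - n, -1, 1),
     (x_original - n, y_original, 1, 1), (x_original, y_original + n, 1, -1)]
  edges.flatMap (pvEdge limit n)

-- ===== PRECONDITION & SPEC =====
-- For dist < -1 whose leftover half-walk still hits the grid square, A's last two while-loops
-- run (x starts left of x_original) and A yields stray points of a degenerate diamond; B yields
-- nothing, the intended result for a negative radius.
def D_walk_around_py (x_original : Int) (y_original : Int) (dist : Int) (limit : Int) : Prop :=
  dist < -1 ∧
    (0 ⊔ (-x_original - dist - 1) ⊔ -y_original
        ≤ (-dist - 2) ⊓ (limit - x_original - dist - 1) ⊓ (limit - y_original) ∨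
     0 ⊔ -x_original ⊔ (y_original - dist - 1 - limit)
        ≤ (-dist - 2) ⊓ (limit - x_original) ⊓ (y_original - dist - 1))
instance (x_original : Int) (y_original : Int) (dist : Int) (limit : Int) : Decidable (D_walk_around_py x_original y_original dist limit) := by unfold D_walk_around_py; infer_instance

def Spec_walk_around_py (x_original : Int) (y_original : Int) (dist : Int) (limit : Int) (out : List (Int × Int)) : Prop := ¬ D_walk_around_py x_original y_original dist limit → out = walk_around_py_alt x_original y_original dist limit
instance (x_original : Int) (y_original : Int) (dist : Int) (limit : Int) (out : List (Int × Int)) : Decidable (Spec_walk_around_py x_original y_original dist limit out) := by unfold Spec_walk_around_py; infer_instance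

def pvDiffWitness_walk_around_py : Int × Int × Int × Int := (0, 0, -3, 10)
def pvDiffWitnessOut_walk_around_py : (List (Int × Int)) × (List (Int × Int)) := ([(0, 2), (1, 1)], [])

-- ===== CLAIM (what is proved, stated in full; the proofs are below) =====
def Claim_unchanged_walk_around_py : Prop := ∀ (x_original : Int) (y_original : Int) (dist : Int) (limit : Int), Dom_walk_around_py x_original y_original dist limit → Spec_walk_around_py x_original y_original dist limit (walk_around_py x_original y_original dist limit)
def Claim_changed_walk_around_py : Prop := Dom_walk_around_py (pvDiffWitness_walk_around_py.1) (pvDiffWitness_walk_around_py.2.1) (pvDiffWitness_walk_around_py.2.2.1) (pvDiffWitness_walk_around_py.2.2.2) ∧ D_walk_around_py (pvDiffWitness_walk_around_py.1) (pvDiffWitness_walk_around_py.2.1) (pvDiffWitness_walk_around_py.2.2.1) (pvDiffWitness_walk_around_py.2.2.2) ∧ walk_around_py (pvDiffWitness_walk_around_py.1) (pvDiffWitness_walk_around_py.2.1) (pvDiffWitness_walk_around_py.2.2.1) (pvDiffWitness_walk_around_py.2.2.2) = pvDiffWitnessOut_walk_around_py.1 ∧ walk_around_py_alt (pvDiffWitness_walk_around_py.1)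 (pvDiffWitness_walk_around_py.2.1) (pvDiffWitness_walk_around_py.2.2.1) (pvDiffWitness_walk_around_py.2.2.2) = pvDiffWitnessOut_walk_around_py.2 ∧ pvDiffWitnessOut_walk_around_py.1 ≠ pvDiffWitnessOut_walk_around_py.2
def Claim_exact_walk_around_py : Prop := ∀ (x_original : Int) (y_original : Int) (dist : Int) (limit : Int), Dom_walk_around_py x_original y_original dist limit → D_walk_around_py x_original y_original dist limit → walk_around_py x_original y_original dist limit ≠ walk_around_py_alt x_original y_original dist limit

-- ===== LEMMAS AND PROOFS =====

theorem pvStep {α : Type} (P : α → Prop) [DecidablePred P] (a : α) (l acc : List α) :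
    (List.filter (fun x => decide (P x)) l).reverse ++ (if P a then a :: acc else acc)
      = (List.filter (fun x => decide (P x)) (a :: l)).reverse ++ acc := by
  by_cases h : P a <;> simp [h]

theorem pvLoop4_count (x0 y0 limit : Int) : ∀ (m : Nat) (x : Int) (acc : List (Int × Int)),
    pvLoop4 x0 y0 limit x (y0 + m) acc =
      (((List.range m).map (fun t : Nat => (x + t, y0 + m - t))).filter
        (fun p => decide (0 ≤ p.1 ∧ p.1 ≤ limit ∧ 0 ≤ p.2 ∧ p.2 ≤ limit))).reverse ++ acc := by
  intro m
  induction m with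
  | zero => intro x acc; rw [pvLoop4, if_neg (by omega)]; simp
  | succ m ih =>
    intro x acc
    rw [pvLoop4, if_pos (by omega),
        show (y0 + (((m : Nat) + 1 : Nat) : Int) - 1 : Int) = y0 + m by push_cast; ring,
        ih (x + 1)]
    rw [List.range_succ_eq_map, List.map_cons, List.map_map]
    rw [show ((fun t : Nat => (x + (t : Int), y0 + (((m : Nat) + 1 : Nat) : Int) - (t : Int))) ∘ Nat.succ)
        = (fun t : Nat => ((x + 1) + (t : Int), y0 + (m : Int) - (t : Int))) from by
      funext t
      simp only [Function.comp_apply, Nat.succ_eq_add_one, Prod.mk.injEq]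
      constructor <;> push_cast <;> ring]
    rw [show ((x + ((0 : Nat) : Int), y0 + (((m : Nat) + 1 : Nat) : Int) - ((0 : Nat) : Int)))
        = (x, y0 + (((m : Nat) + 1 : Nat) : Int)) by norm_num]
    exact pvStep (fun p : Int × Int => 0 ≤ p.1 ∧ p.1 ≤ limit ∧ 0 ≤ p.2 ∧ p.2 ≤ limit)
      (x, y0 + (((m : Nat) + 1 : Nat) : Int)) _ _
theorem pvLoop3_count (x0 y0 limit : Int) : ∀ (m : Nat) (y : Int) (acc : List (Int × Int)),
    pvLoop3 x0 y0 limit (x0 - m) y acc =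
      pvLoop4 x0 y0 limit x0 (y + m)
        ((((List.range m).map (fun t : Nat => (x0 - m + t, y + t))).filter
          (fun p => decide (0 ≤ p.1 ∧ p.1 ≤ limit ∧ 0 ≤ p.2 ∧ p.2 ≤ limit))).reverse ++ acc) := by
  intro m
  induction m with
  | zero => intro y acc; rw [pvLoop3, if_neg (by omega)]; simp
  | succ m ih =>
    intro y acc
    rw [pvLoop3, if_pos (by omega),
        show (x0 - (((m : Nat) + 1 : Nat) : Int) + 1 : Int) = x0 - m by push_cast; ring,
        ih (y + 1),
        show ((y + 1) + (m : Int)) = y + (((m : Nat) + 1 : Nat) : Int) by push_cast; ring]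
    congr 1
    rw [List.range_succ_eq_map, List.map_cons, List.map_map]
    rw [show ((fun t : Nat => (x0 - (((m : Nat) + 1 : Nat) : Int) + (t : Int), y + (t : Int))) ∘ Nat.succ)
        = (fun t : Nat => (x0 - (m : Int) + (t : Int), (y + 1) + (t : Int))) from by
      funext t
      simp only [Function.comp_apply, Nat.succ_eq_add_one, Prod.mk.injEq]
      constructor <;> push_cast <;> ring]
    rw [show ((x0 - (((m : Nat) + 1 : Nat) : Int) + ((0 : Nat) : Int), y + ((0 : Nat) : Int)))
        = (x0 - (((m : Nat) + 1 : Nat) : Int), y) by norm_num]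
    exact pvStep (fun p : Int × Int => 0 ≤ p.1 ∧ p.1 ≤ limit ∧ 0 ≤ p.2 ∧ p.2 ≤ limit)
      (x0 - (((m : Nat) + 1 : Nat) : Int), y) _ _
theorem pvLoop2_count (x0 y0 limit : Int) : ∀ (m : Nat) (x : Int) (acc : List (Int × Int)),
    pvLoop2 x0 y0 limit x (y0 - m) acc =
      pvLoop3 x0 y0 limit (x - m) y0
        ((((List.range m).map (fun t : Nat => (x - t, y0 - m + t))).filter
          (fun p => decide (0 ≤ p.1 ∧ p.1 ≤ limit ∧ 0 ≤ p.2 ∧ p.2 ≤ limit))).reverse ++ acc) := by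
  intro m
  induction m with
  | zero => intro x acc; rw [pvLoop2, if_neg (by omega)]; simp
  | succ m ih =>
    intro x acc
    rw [pvLoop2, if_pos (by omega),
        show (y0 - (((m : Nat) + 1 : Nat) : Int) + 1 : Int) = y0 - m by push_cast; ring,
        ih (x - 1),
        show ((x - 1) - (m : Int)) = x - (((m : Nat) + 1 : Nat) : Int) by push_cast; ring]
    congr 1
    rw [List.range_succ_eq_map, List.map_cons, List.map_map]
    rw [show ((fun t : Nat => (x - (t : Int), y0 - (((m : Nat) + 1 : Nat) : Int) + (t : Int))) ∘ Nat.succ)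
        = (fun t : Nat => ((x - 1) - (t : Int), y0 - (m : Int) + (t : Int))) from by
      funext t
      simp only [Function.comp_apply, Nat.succ_eq_add_one, Prod.mk.injEq]
      constructor <;> push_cast <;> ring]
    rw [show ((x - ((0 : Nat) : Int), y0 - (((m : Nat) + 1 : Nat) : Int) + ((0 : Nat) : Int)))
        = (x, y0 - (((m : Nat) + 1 : Nat) : Int)) by norm_num]
    exact pvStep (fun p : Int × Int => 0 ≤ p.1 ∧ p.1 ≤ limit ∧ 0 ≤ p.2 ∧ p.2 ≤ limit)
      (x, y0 - (((m : Nat) + 1 : Nat) : Int)) _ _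
theorem pvLoop1_count (x0 y0 limit : Int) : ∀ (m : Nat) (y : Int) (acc : List (Int × Int)),
    pvLoop1 x0 y0 limit (x0 + m) y acc =
      pvLoop2 x0 y0 limit x0 (y - m)
        ((((List.range m).map (fun t : Nat => (x0 + m - t, y - t))).filter
          (fun p => decide (0 ≤ p.1 ∧ p.1 ≤ limit ∧ 0 ≤ p.2 ∧ p.2 ≤ limit))).reverse ++ acc) := by
  intro m
  induction m with
  | zero => intro y acc; rw [pvLoop1, if_neg (by omega)]; simp
  | succ m ih =>
    intro y acc
    rw [pvLoop1, if_pos (by omega),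
        show (x0 + (((m : Nat) + 1 : Nat) : Int) - 1 : Int) = x0 + m by push_cast; ring,
        ih (y - 1),
        show ((y - 1) - (m : Int)) = y - (((m : Nat) + 1 : Nat) : Int) by push_cast; ring]
    congr 1
    rw [List.range_succ_eq_map, List.map_cons, List.map_map]
    rw [show ((fun t : Nat => (x0 + (((m : Nat) + 1 : Nat) : Int) - (t : Int), y - (t : Int))) ∘ Nat.succ)
        = (fun t : Nat => (x0 + (m : Int) - (t : Int), (y - 1) - (t : Int))) from by
      funext t
      simp only [Function.comp_apply, Nat.succ_eq_add_one, Prod.mk.injEq]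
      constructor <;> push_cast <;> ring]
    rw [show ((x0 + (((m : Nat) + 1 : Nat) : Int) - ((0 : Nat) : Int), y - ((0 : Nat) : Int)))
        = (x0 + (((m : Nat) + 1 : Nat) : Int), y) by norm_num]
    exact pvStep (fun p : Int × Int => 0 ≤ p.1 ∧ p.1 ≤ limit ∧ 0 ≤ p.2 ∧ p.2 ≤ limit)
      (x0 + (((m : Nat) + 1 : Nat) : Int), y) _ _

-- an increasing pyRange is the filter of an enclosing List.range by its interval condition
theorem pvRangeFilter (a : Int) (ha : 0 ≤ a) : ∀ (n : Nat) (hi : Int), hi + 1 ≤ (n : Int) →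
    PySem.List.pyRange a (hi + 1) 1
      = ((List.range n).filter (fun t : Nat => decide (a ≤ (t : Int) ∧ (t : Int) ≤ hi))).map
          (fun t : Nat => (t : Int)) := by
  intro n
  induction n with
  | zero =>
    intro hi hb
    rw [PySem.List.pyRange_one_eq_nil (by omega)]; simp
  | succ n ih =>
    intro hi hb
    by_cases h1 : hi + 1 ≤ (n : Int)
    · rw [List.range_succ, List.filter_append, ih hi h1]
      have : List.filter (fun t : Nat => decide (a ≤ (t : Int) ∧ (t : Int) ≤ hi)) [n] = [] := by
        simp only [List.filter_cons, List.filter_nil, decide_eq_true_eq]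
        rw [if_neg (by omega)]
      rw [this, List.append_nil]
    · have hhi : hi = (n : Int) := by omega
      by_cases h2 : a ≤ (n : Int)
      · rw [List.range_succ, List.filter_append]
        have hlast : List.filter (fun t : Nat => decide (a ≤ (t : Int) ∧ (t : Int) ≤ hi)) [n]
            = [n] := by
          simp only [List.filter_cons, List.filter_nil, decide_eq_true_eq]
          rw [if_pos (by omega)]
        rw [hlast, List.map_append,
          List.filter_congr (l := List.range n)
            (q := fun t : Nat => decide (a ≤ (t : Int) ∧ (t : Int) ≤ (n : Int) - 1))
            (by intro t ht; have := List.mem_range.1 ht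
                rw [decide_eq_decide]
                constructor <;> intro h <;> constructor <;> omega),
          ← ih ((n : Int) - 1) (by omega)]
        rw [show ((n : Int) - 1 + 1) = (n : Int) by ring,
          show (hi + 1) = (n : Int) + 1 by omega,
          PySem.List.pyRange_one_succ_right h2]
        simp
      · rw [PySem.List.pyRange_one_eq_nil (by omega)]
        rw [List.filter_eq_nil_iff.2 (by
          intro t ht
          simp only [decide_eq_true_eq]
          omega)]
        simp

-- one clipped edge equals the bounds-filtered full edge
theorem pvClip {α : Type} (p : α → Bool) (f : Int → α) (lo hi : Int) (n : Nat)
    (h0 : 0 ≤ lo) (hn : hi + 1 ≤ (n : Int))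
    (hp : ∀ t : Nat, t < n → p (f (t : Int)) = decide (lo ≤ (t : Int) ∧ (t : Int) ≤ hi)) :
    (PySem.List.pyRange lo (hi + 1) 1).map f
      = ((List.range n).map (fun t : Nat => f (t : Int))).filter p := by
  rw [pvRangeFilter lo h0 n hi hn, List.map_map, List.filter_map]
  exact congrArg _ (List.filter_congr
    (fun t ht => (hp t (List.mem_range.1 ht)).symm))

theorem alt_eq (x0 y0 dist limit : Int) :
    walk_around_py_alt x0 y0 dist limit =
      ((List.range (dist + 1).toNat).map
          (fun t : Nat => (x0 + ((dist + 1).toNat : Int) - t, y0 - t))).filter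
        (fun p => decide (0 ≤ p.1 ∧ p.1 ≤ limit ∧ 0 ≤ p.2 ∧ p.2 ≤ limit))
      ++ ((List.range (dist + 1).toNat).map
          (fun t : Nat => (x0 - (t : Int), y0 - ((dist + 1).toNat : Int) + t))).filter
        (fun p => decide (0 ≤ p.1 ∧ p.1 ≤ limit ∧ 0 ≤ p.2 ∧ p.2 ≤ limit))
      ++ ((List.range (dist + 1).toNat).map
          (fun t : Nat => (x0 - ((dist + 1).toNat : Int) + t, y0 + t))).filter
        (fun p => decide (0 ≤ p.1 ∧ p.1 ≤ limit ∧ 0 ≤ p.2 ∧ p.2 ≤ limit))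
      ++ ((List.range (dist + 1).toNat).map
          (fun t : Nat => (x0 + (t : Int), y0 + ((dist + 1).toNat : Int) - t))).filter
        (fun p => decide (0 ≤ p.1 ∧ p.1 ≤ limit ∧ 0 ≤ p.2 ∧ p.2 ≤ limit)) := by
  rw [walk_around_py_alt]
  simp only [List.flatMap_cons, List.flatMap_nil, List.append_nil]
  rw [← List.append_assoc, ← List.append_assoc]
  congr 1
  congr 1
  congr 1
  · rw [show pvEdge limit (dist + 1) (x0 + (dist + 1), y0, -1, -1)
        = (PySem.List.pyRange (max (max 0 (x0 + (dist + 1) - limit)) (y0 - limit)) ((min (min (dist + 1 - 1) (x0 + (dist + 1))) y0) + 1) 1).map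
            (fun t => (x0 + (dist + 1) + (-1) * t, y0 + (-1) * t)) from by simp [pvEdge]]
    rw [pvClip (fun q => decide (0 ≤ q.1 ∧ q.1 ≤ limit ∧ 0 ≤ q.2 ∧ q.2 ≤ limit))
        (fun t => (x0 + (dist + 1) + (-1) * t, y0 + (-1) * t)) (max (max 0 (x0 + (dist + 1) - limit)) (y0 - limit)) (min (min (dist + 1 - 1) (x0 + (dist + 1))) y0) ((dist + 1).toNat)
        (by omega) (by omega)
        (by intro t ht
            simp only [decide_eq_decide]
            constructor <;> intro hh <;> push_cast at * <;>
              [exact (by omega); exact (by omega)])]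
    congr 1
    apply List.map_congr_left
    intro t ht
    have htm := List.mem_range.1 ht
    simp only [Prod.mk.injEq]
    constructor <;> omega
  · rw [show pvEdge limit (dist + 1) (x0, y0 - (dist + 1), -1, 1)
        = (PySem.List.pyRange (max (max 0 (x0 - limit)) (-(y0 - (dist + 1)))) ((min (min (dist + 1 - 1) x0) (limit - (y0 - (dist + 1)))) + 1) 1).map
            (fun t => (x0 + (-1) * t, y0 - (dist + 1) + 1 * t)) from by simp [pvEdge]]
    rw [pvClip (fun q => decide (0 ≤ q.1 ∧ q.1 ≤ limit ∧ 0 ≤ q.2 ∧ q.2 ≤ limit))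
        (fun t => (x0 + (-1) * t, y0 - (dist + 1) + 1 * t)) (max (max 0 (x0 - limit)) (-(y0 - (dist + 1)))) (min (min (dist + 1 - 1) x0) (limit - (y0 - (dist + 1)))) ((dist + 1).toNat)
        (by omega) (by omega)
        (by intro t ht
            simp only [decide_eq_decide]
            constructor <;> intro hh <;> push_cast at * <;>
              [exact (by omega); exact (by omega)])]
    congr 1
    apply List.map_congr_left
    intro t ht
    have htm := List.mem_range.1 ht
    simp only [Prod.mk.injEq]
    constructor <;> omega
  · rw [show pvEdge limit (dist + 1) (x0 - (dist + 1), y0, 1, 1)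
        = (PySem.List.pyRange (max (max 0 (-(x0 - (dist + 1)))) (-y0)) ((min (min (dist + 1 - 1) (limit - (x0 - (dist + 1)))) (limit - y0)) + 1) 1).map
            (fun t => (x0 - (dist + 1) + 1 * t, y0 + 1 * t)) from by simp [pvEdge]]
    rw [pvClip (fun q => decide (0 ≤ q.1 ∧ q.1 ≤ limit ∧ 0 ≤ q.2 ∧ q.2 ≤ limit))
        (fun t => (x0 - (dist + 1) + 1 * t, y0 + 1 * t)) (max (max 0 (-(x0 - (dist + 1)))) (-y0)) (min (min (dist + 1 - 1) (limit - (x0 - (dist + 1)))) (limit - y0)) ((dist + 1).toNat)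
        (by omega) (by omega)
        (by intro t ht
            simp only [decide_eq_decide]
            constructor <;> intro hh <;> push_cast at * <;>
              [exact (by omega); exact (by omega)])]
    congr 1
    apply List.map_congr_left
    intro t ht
    have htm := List.mem_range.1 ht
    simp only [Prod.mk.injEq]
    constructor <;> omega
  · rw [show pvEdge limit (dist + 1) (x0, y0 + (dist + 1), 1, -1)
        = (PySem.List.pyRange (max (max 0 (-x0)) (y0 + (dist + 1) - limit)) ((min (min (dist + 1 - 1) (limit - x0)) (y0 + (dist + 1))) + 1) 1).map
            (fun t => (x0 + 1 * t, y0 + (dist + 1) + (-1) * t)) from by simp [pvEdge]]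
    rw [pvClip (fun q => decide (0 ≤ q.1 ∧ q.1 ≤ limit ∧ 0 ≤ q.2 ∧ q.2 ≤ limit))
        (fun t => (x0 + 1 * t, y0 + (dist + 1) + (-1) * t)) (max (max 0 (-x0)) (y0 + (dist + 1) - limit)) (min (min (dist + 1 - 1) (limit - x0)) (y0 + (dist + 1))) ((dist + 1).toNat)
        (by omega) (by omega)
        (by intro t ht
            simp only [decide_eq_decide]
            constructor <;> intro hh <;> push_cast at * <;>
              [exact (by omega); exact (by omega)])]
    congr 1
    apply List.map_congr_left
    intro t ht
    have htm := List.mem_range.1 ht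
    simp only [Prod.mk.injEq]
    constructor <;> omega

-- A expressed through the loop lemmas, negative-radius case: only loops 3 and 4 run
theorem a_eq_neg (x0 y0 dist limit : Int) (h : dist < -1) :
    walk_around_py x0 y0 dist limit =
      ((List.range (-dist - 1).toNat).map
          (fun t : Nat => (x0 - ((-dist - 1).toNat : Int) + t, y0 + t))).filter
        (fun p => decide (0 ≤ p.1 ∧ p.1 ≤ limit ∧ 0 ≤ p.2 ∧ p.2 ≤ limit))
      ++ ((List.range (-dist - 1).toNat).map
          (fun t : Nat => (x0 + (t : Int), y0 + ((-dist - 1).toNat : Int) - t))).filter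
        (fun p => decide (0 ≤ p.1 ∧ p.1 ≤ limit ∧ 0 ≤ p.2 ∧ p.2 ≤ limit)) := by
  rw [walk_around_py, pvLoop1, if_neg (by omega), pvLoop2, if_neg (by omega)]
  rw [show (x0 + dist + 1 : Int) = x0 - ((-dist - 1).toNat : Int) by omega]
  rw [pvLoop3_count, pvLoop4_count]
  simp [List.reverse_append]

-- ===== VERDICT (by name: the statement is the Claim_ definition above) =====
theorem walk_around_py_spec : Claim_unchanged_walk_around_py := by
  intro x0 y0 dist limit _ hD
  by_cases h : dist < -1
  · -- degenerate radius outside D_: both sides are empty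
    have hz : (dist + 1).toNat = 0 := by omega
    rw [a_eq_neg x0 y0 dist limit h, alt_eq]
    simp only [hz, List.range_zero, List.map_nil, List.filter_nil, List.append_nil]
    rw [List.filter_eq_nil_iff.2 ?seg3, List.filter_eq_nil_iff.2 ?seg4, List.append_nil]
    case seg3 =>
      intro p hp
      obtain ⟨t, ht, rfl⟩ := List.mem_map.1 hp
      have htm := List.mem_range.1 ht
      simp only [decide_eq_true_eq]
      rintro ⟨h1, h2, h3, h4⟩
      exact hD ⟨h, Or.inl (by omega)⟩
    case seg4 =>
      intro p hp
      obtain ⟨t, ht, rfl⟩ := List.mem_map.1 hp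
      have htm := List.mem_range.1 ht
      simp only [decide_eq_true_eq]
      rintro ⟨h1, h2, h3, h4⟩
      exact hD ⟨h, Or.inr (by omega)⟩
  · -- ordinary radius: all four edges agree
    show walk_around_py x0 y0 dist limit = _
    rw [walk_around_py,
      show (x0 + dist + 1 : Int) = x0 + ((dist + 1).toNat : Int) by omega,
      pvLoop1_count, pvLoop2_count, pvLoop3_count, pvLoop4_count, alt_eq]
    simp [List.reverse_append, List.append_assoc]

theorem walk_around_py_changed : Claim_changed_walk_around_py := by
  unfold Claim_changed_walk_around_py
  refine ⟨by decide, by decide, ?_, by decide, by decide⟩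
  show walk_around_py 0 0 (-3) 10 = [(0, 2), (1, 1)]
  rw [walk_around_py]
  rw [pvLoop1]; norm_num
  rw [pvLoop2]; norm_num
  rw [pvLoop3]; norm_num
  rw [pvLoop3]; norm_num
  rw [pvLoop3]; norm_num
  rw [pvLoop4]; norm_num
  rw [pvLoop4]; norm_num
  rw [pvLoop4]; norm_num

theorem walk_around_py_tight : Claim_exact_walk_around_py := by
  intro x0 y0 dist limit _ hD heq
  obtain ⟨h, hor⟩ := hD
  have hz : (dist + 1).toNat = 0 := by omega
  rw [a_eq_neg x0 y0 dist limit h, alt_eq] at heq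
  simp only [hz, List.range_zero, List.map_nil, List.filter_nil, List.append_nil,
    List.append_eq_nil_iff] at heq
  obtain ⟨h3, h4⟩ := heq
  rcases hor with hc | hc
  · have hco := List.filter_eq_nil_iff.1 h3
      (x0 - ((-dist - 1).toNat : Int) + (((max (max 0 (-x0 - dist - 1)) (-y0)).toNat : Int)),
        y0 + (((max (max 0 (-x0 - dist - 1)) (-y0)).toNat : Int)))
      (List.mem_map.2 ⟨(max (max 0 (-x0 - dist - 1)) (-y0)).toNat,
        List.mem_range.2 (by omega), rfl⟩)
    simp only [decide_eq_true_eq] at hco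
    exact hco ⟨by omega, by omega, by omega, by omega⟩
  · have hco := List.filter_eq_nil_iff.1 h4
      (x0 + (((max (max 0 (-x0)) (y0 - dist - 1 - limit)).toNat : Int)),
        y0 + ((-dist - 1).toNat : Int) - (((max (max 0 (-x0)) (y0 - dist - 1 - limit)).toNat : Int)))
      (List.mem_map.2 ⟨(max (max 0 (-x0)) (y0 - dist - 1 - limit)).toNat,
        List.mem_range.2 (by omega), rfl⟩)
    simp only [decide_eq_true_eq] at hco
    exact hco ⟨by omega, by omega, by omega, by omega⟩
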